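-- pv_equiv track=rewrite | github.com/qq793199244/HuaWeiCode | HJ21简单密码.py | func
-- ===== SOURCE A (Python) =====
-- def func(s):
--     res = ''
--     for c in s:
--         if '0' <= c <= '9':
--             res += c
--         elif c.isupper() and c != 'Z':
--             # chr() 返回值是当前整数对应的 ASCII 字符
--             # ord() 返回值是对应的十进制整数
--             res += chr(ord(c.lower()) + 1)
--         elif c == 'Z':
--             res += 'a'
--         elif c in 'abc':
--             res += '2'
--         elif c in 'def':
--             res += '3'
--         elif c in 'ghi':
--             res += '4'
--         elif c in 'jkl':
--             res += '5'
--         elif c in 'mno':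
--             res += '6'
--         elif c in 'pqrs':
--             res += '7'
--         elif c in 'tuv':
--             res += '8'
--         elif c in 'wxyz':
--             res += '9'
--     return res
-- ===== SOURCE B (Python) =====
-- def func(s):
--     # pure code-point arithmetic: modular Caesar formula for uppercase and a
--     # divmod formula for the keypad digit; no tables, no membership tests
--     def enc(o):
--         if 48 <= o <= 57:
--             return chr(o)
--         if 65 <= o <= 90:
--             return chr(97 + (o - 64) % 26)
--         if 97 <= o <= 122:
--             return chr(50 + (o - 97 - (o >= 115) - (o >= 122)) // 3)
--         return ''
--     return ''.join(map(enc, map(ord, s)))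
-- ===== Notes on version B (the rewrite author's own statement) =====
-- stated objective: alternative
-- what changed: A's twelve-way if/elif ladder with string-membership tests is replaced by pure code-point arithmetic: a modular Caesar formula chr(97+(o-64)%26) unifies the A-Y and Z cases, and the keypad digit is computed by a divmod formula chr(50+(i-(o>='s')-(o=='z'))//3) instead of eight membership tests; the result is joined from per-char strings ('' for dropped chars).
import Mathlib
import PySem

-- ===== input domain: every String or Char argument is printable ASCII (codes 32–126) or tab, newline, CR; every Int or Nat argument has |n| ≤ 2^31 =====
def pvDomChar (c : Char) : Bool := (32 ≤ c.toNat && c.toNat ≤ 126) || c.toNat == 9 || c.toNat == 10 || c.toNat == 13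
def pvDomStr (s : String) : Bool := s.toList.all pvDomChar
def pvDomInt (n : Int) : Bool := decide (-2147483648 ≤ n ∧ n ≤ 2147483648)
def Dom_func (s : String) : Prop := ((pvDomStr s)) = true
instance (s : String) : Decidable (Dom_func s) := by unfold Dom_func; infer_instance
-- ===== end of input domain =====

set_option maxRecDepth 100000
set_option maxHeartbeats 1000000


-- B replaces A's if/elif membership ladder by closed-form code-point arithmetic
-- (a modular Caesar formula and a divmod keypad formula); objective: alternative.

-- ===== PORT A =====
-- literal port of A's loop: res starts empty, each char appends via the if/elif chain
def funcBranch (res : List Char) (c : Char) : List Char :=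
  if decide ('0' ≤ c ∧ c ≤ '9') then res ++ [c]
  else if PySem.Chars.isupper c && !(c == 'Z') then
    res ++ [Char.ofNat ((PySem.Chars.lowerChar c).toNat + 1)]
  else if c == 'Z' then res ++ ['a']
  else if "abc".toList.contains c then res ++ ['2']   -- c in 'abc' (single char: membership)
  else if "def".toList.contains c then res ++ ['3']
  else if "ghi".toList.contains c then res ++ ['4']
  else if "jkl".toList.contains c then res ++ ['5']
  else if "mno".toList.contains c then res ++ ['6']
  else if "pqrs".toList.contains c then res ++ ['7']
  else if "tuv".toList.contains c then res ++ ['8']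
  else if "wxyz".toList.contains c then res ++ ['9']
  else res

def funcGo (res : List Char) : List Char → List Char
  | [] => res
  | c :: t => funcGo (funcBranch res c) t

def func (s : String) : String := String.mk (funcGo [] s.toList)

-- ===== PORT B =====
-- Source B's enc: pure arithmetic on the code point o (Python bools count as 0/1 in
-- the subtraction; '//' on these nonnegative ints equals Nat division, exact here)
def funcEnc (o : Nat) : List Char :=
  if 48 ≤ o ∧ o ≤ 57 then [Char.ofNat o]
  else if 65 ≤ o ∧ o ≤ 90 then [Char.ofNat (97 + (o - 64) % 26)]
  else if 97 ≤ o ∧ o ≤ 122 then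
    [Char.ofNat (50 + (o - 97 - (if 115 ≤ o then 1 else 0) - (if 122 ≤ o then 1 else 0)) / 3)]
  else []

-- ''.join(map(enc, map(ord, s))): joining with '' is concatenation, i.e. flatten
def func_alt (s : String) : String :=
  String.mk ((s.toList.map (fun c => funcEnc c.toNat)).flatten)

-- ===== PRECONDITION & SPEC =====
def Spec_func (s : String) (out : String) : Prop := out = func_alt s
instance (s : String) (out : String) : Decidable (Spec_func s out) := by unfold Spec_func; infer_instance

-- ===== CLAIM (what is proved, stated in full; the proofs are below) =====
def Claim_equal_func : Prop := ∀ (s : String), Dom_func s → Spec_func s (func s)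

-- ===== LEMMAS AND PROOFS =====

-- A's per-character contribution (the chunk the if/elif chain appends)
def stepA (c : Char) : List Char :=
  if decide ('0' ≤ c ∧ c ≤ '9') then [c]
  else if PySem.Chars.isupper c && !(c == 'Z') then [Char.ofNat ((PySem.Chars.lowerChar c).toNat + 1)]
  else if c == 'Z' then ['a']
  else if "abc".toList.contains c then ['2']
  else if "def".toList.contains c then ['3']
  else if "ghi".toList.contains c then ['4']
  else if "jkl".toList.contains c then ['5']
  else if "mno".toList.contains c then ['6']
  else if "pqrs".toList.contains c then ['7']
  else if "tuv".toList.contains c then ['8']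
  else if "wxyz".toList.contains c then ['9']
  else []

lemma funcBranch_eq (res : List Char) (c : Char) : funcBranch res c = res ++ stepA c := by
  unfold funcBranch stepA
  simp only [apply_ite (res ++ ·), List.append_nil]

lemma funcGo_eq (l : List Char) : ∀ res, funcGo res l = res ++ l.flatMap stepA := by
  induction l with
  | nil => intro res; simp [funcGo]
  | cons c t ih =>
    intro res
    rw [funcGo, funcBranch_eq, ih, List.flatMap_cons, List.append_assoc]

lemma pvKey : ∀ n ∈ List.range 127, stepA (Char.ofNat n) = funcEnc n := by decide

lemma step_eq (c : Char) (h : pvDomChar c = true) : stepA c = funcEnc c.toNat := by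
  have hlt : c.toNat < 127 := by
    simp only [pvDomChar, Bool.or_eq_true, Bool.and_eq_true, decide_eq_true_eq,
      Nat.beq_eq_true_eq] at h
    omega
  have := pvKey c.toNat (List.mem_range.mpr hlt)
  simpa [Char.ofNat_toNat] using this

lemma flatMap_eq (l : List Char) (h : l.all pvDomChar = true) :
    l.flatMap stepA = (l.map (fun c => funcEnc c.toNat)).flatten := by
  induction l with
  | nil => rfl
  | cons c t ih =>
    simp only [List.all_cons, Bool.and_eq_true] at h
    simp [step_eq c h.1, ih h.2]

-- ===== VERDICT (by name: the statement is the Claim_ definition above) =====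
theorem func_spec : Claim_equal_func := by
  intro s hdom
  unfold Spec_func func func_alt
  rw [funcGo_eq, List.nil_append, flatMap_eq s.toList hdom]
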